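-- pv_equiv track=rewrite | github.com/docToolchain/aoc-2022 | day06/python/solution.py | check_window
-- ===== SOURCE A (Python) =====
-- def check_window(input_lines,length):
--     window = input_lines[0:length]
--     position = length
--     if len(set(window))==length:
--         return position
--     else:
--         for letter in input_lines[length:]:
--             position += 1
--             window = input_lines[position - length:position]
--             if len(set(window))==length:
--                 return position
--
--     return
-- ===== SOURCE B (Python) =====
-- def check_window(input_lines, length):
--     # Single-pass sliding window: `start` is the left edge of the longest
--     # all-distinct window ending at the current character, maintained via
--     # a last-seen-index map; O(n) instead of O(n*length).
--     if length < 0: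
--         return None
--     if length == 0:
--         return 0
--     last = {}
--     start = 0
--     for i, c in enumerate(input_lines):
--         j = last.get(c)
--         if j is not None and j >= start:
--             start = j + 1
--         last[c] = i
--         if i - start + 1 >= length:
--             return i + 1
--     return None
-- ===== Notes on version B (the rewrite author's own statement) =====
-- stated objective: faster
-- what changed: Replaces the rebuild-a-set-per-position scan with a single-pass sliding window that keeps a last-seen-index map and the left edge of the current all-distinct window.
import Mathlib
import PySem

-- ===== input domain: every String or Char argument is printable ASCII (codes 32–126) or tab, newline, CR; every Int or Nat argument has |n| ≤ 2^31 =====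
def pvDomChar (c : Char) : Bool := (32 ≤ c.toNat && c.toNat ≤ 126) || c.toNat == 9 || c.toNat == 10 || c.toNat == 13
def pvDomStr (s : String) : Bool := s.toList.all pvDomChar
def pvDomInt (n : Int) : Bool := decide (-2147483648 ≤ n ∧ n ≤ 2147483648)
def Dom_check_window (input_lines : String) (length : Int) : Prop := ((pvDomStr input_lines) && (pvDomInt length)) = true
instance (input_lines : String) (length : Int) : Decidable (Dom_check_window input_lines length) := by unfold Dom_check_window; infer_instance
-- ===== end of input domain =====

-- B replaces A's rebuild-a-set-per-position scan by a single-pass sliding window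
-- with a last-seen-index map (objective: faster). Equivalence of return values is proved below.

-- ===== PORT A =====
-- the 'for letter in input_lines[length:]' loop of A
def awLoop (s : List Char) (length : Int) : List Char → Int → Option Int
  | [], _ => none
  | _ :: rest, position =>
      let position' := position + 1
      let window := PySem.List.slice s (some (position' - length)) (some position')
      if ((PySem.Set.ofList window).length : Int) = length then some position'
      else awLoop s length rest position'

def check_window (input_lines : String) (length : Int) : Option Int :=
  let s := input_lines.toList
  let window := PySem.List.slice s (some 0) (some length)
  let position := length
  if ((PySem.Set.ofList window).length : Int) = length then some position
  else awLoop s length (PySem.List.slice s (some length) none) position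

-- ===== PORT B =====
-- the 'for i, c in enumerate(input_lines)' loop of B
def bwLoop (length : Int) : List (Int × Char) → PySem.Dict Char Int → Int → Option Int
  | [], _, _ => none
  | (i, c) :: rest, last, start =>
      let start' := match PySem.Dict.get? last c with
        | some j => if start ≤ j then j + 1 else start
        | none => start
      let last' := PySem.Dict.insert last c i
      if length ≤ i - start' + 1 then some (i + 1)
      else bwLoop length rest last' start'

def check_window_alt (input_lines : String) (length : Int) : Option Int :=
  if length < 0 then none
  else if length = 0 then some 0
  else bwLoop length (PySem.List.enumerate input_lines.toList 0) PySem.Dict.empty 0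

-- ===== PRECONDITION & SPEC =====
def Spec_check_window (input_lines : String) (length : Int) (out : Option Int) : Prop := out = check_window_alt input_lines length
instance (input_lines : String) (length : Int) (out : Option Int) : Decidable (Spec_check_window input_lines length out) := by unfold Spec_check_window; infer_instance

-- ===== CLAIM (what is proved, stated in full; the proofs are below) =====
def Claim_equal_check_window : Prop := ∀ (input_lines : String) (length : Int), Dom_check_window input_lines length → Spec_check_window input_lines length (check_window input_lines length)

-- ===== LEMMAS AND PROOFS =====

-- the window of n characters ending at position q (meaningful for n ≤ q ≤ s.length)
def windowAt (s : List Char) (n q : Nat) : List Char := (s.drop (q - n)).take n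

-- both programs compute: the first position q in [n, s.length] whose window is duplicate-free
def firstOKN (s : List Char) (n : Nat) : Option Nat :=
  (List.range' n (s.length + 1 - n)).find? (fun q => decide ((windowAt s n q).Nodup))

-- index of the LAST occurrence of c in t
def lastOcc : List Char → Char → Option Nat
  | [], _ => none
  | x :: t, c => match lastOcc t c with
    | some j => some (j + 1)
    | none => if x = c then some 0 else none

-- j is the least left edge such that t.drop j is duplicate-free
def minStart (t : List Char) (j : Nat) : Prop :=
  j ≤ t.length ∧ (t.drop j).Nodup ∧ ∀ k < j, ¬ (t.drop k).Nodup

-- ---- generic small facts ----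

lemma ofList_sublist (w : List Char) : (PySem.Set.ofList w).Sublist w := by
  induction w with
  | nil => simp [PySem.Set.ofList_nil]
  | cons x t ih =>
      rw [PySem.Set.ofList_cons]
      exact List.Sublist.cons₂ x (List.Sublist.trans (List.filter_sublist) ih)

lemma setLen_eq_iff (w : List Char) : (PySem.Set.ofList w).length = w.length ↔ w.Nodup := by
  constructor
  · intro h
    have := (ofList_sublist w).eq_of_length h
    rw [← this]
    exact PySem.Set.nodup_ofList w
  · intro h
    rw [show PySem.Set.ofList w = w from PySem.Set.ofList_eq_self_of_nodup w h]

lemma nodup_drop_mono {t : List Char} {j k : Nat} (h : (t.drop j).Nodup) (hjk : j ≤ k) :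
    (t.drop k).Nodup := by
  have : t.drop k = (t.drop j).drop (k - j) := by
    rw [List.drop_drop]
    congr 1
    omega
  rw [this]
  exact (List.drop_sublist _ _).nodup h

lemma find?_congr_mem {p p' : Nat → Bool} : ∀ (l : List Nat), (∀ q ∈ l, p q = p' q) →
    l.find? p = l.find? p' := by
  intro l
  induction l with
  | nil => simp
  | cons x t ih =>
      intro h
      simp only [List.find?_cons, h x (List.mem_cons_self)]
      cases p' x with
      | true => rfl
      | false => exact ih (fun q hq => h q (List.mem_cons_of_mem _ hq))

-- ---- lastOcc facts ----

lemma lastOcc_none_iff (t : List Char) (c : Char) : lastOcc t c = none ↔ c ∉ t := by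
  induction t with
  | nil => simp [lastOcc]
  | cons x t ih =>
      simp only [lastOcc, List.mem_cons]
      cases h : lastOcc t c with
      | some j =>
          have hc : c ∈ t := by
            by_contra hc
            rw [ih.mpr hc] at h
            simp at h
          simp [hc]
      | none =>
          rcases eq_or_ne x c with rfl | hx
          · simp
          · simp [hx, Ne.symm hx, ih.mp h]

lemma lastOcc_some {t : List Char} {c : Char} {j : Nat} (h : lastOcc t c = some j) :
    j < t.length ∧ ∀ k, c ∈ t.drop k ↔ k ≤ j := by
  induction t generalizing j with
  | nil => simp [lastOcc] at h
  | cons x t ih =>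
      simp only [lastOcc] at h
      cases h' : lastOcc t c with
      | some j' =>
          rw [h'] at h
          simp only [Option.some.injEq] at h
          subst h
          obtain ⟨hlt, hmem⟩ := ih h'
          refine ⟨by simpa using Nat.succ_lt_succ hlt, ?_⟩
          intro k
          cases k with
          | zero =>
              simp only [List.drop_zero, List.mem_cons]
              exact ⟨fun _ => Nat.zero_le _, fun _ => Or.inr ((hmem 0).mpr (Nat.zero_le _))⟩
          | succ k => simpa using hmem k
      | none =>
          rw [h'] at h
          have hnotmem : c ∉ t := (lastOcc_none_iff t c).mp h'
          by_cases hx : x = c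
          · rw [if_pos hx] at h
            simp only [Option.some.injEq] at h
            subst h
            refine ⟨Nat.succ_pos _, ?_⟩
            intro k
            cases k with
            | zero => simp [hx]
            | succ k =>
                simp only [List.drop_succ_cons, Nat.le_zero]
                constructor
                · intro hc
                  exact absurd (List.drop_subset _ _ hc) hnotmem
                · omega
          · simp [hx] at h

lemma lastOcc_snoc (t : List Char) (x c : Char) :
    lastOcc (t ++ [x]) c = if x = c then some t.length else lastOcc t c := by
  induction t with
  | nil => simp [lastOcc]
  | cons y t ih =>
      simp only [List.cons_append, lastOcc, ih]
      by_cases hx : x = c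
      · simp [hx]
      · simp only [if_neg hx]

-- ---- minStart facts ----

lemma nodup_snoc (u : List Char) (c : Char) : (u ++ [c]).Nodup ↔ u.Nodup ∧ c ∉ u := by
  constructor
  · intro h
    rw [List.nodup_append] at h
    exact ⟨h.1, fun hc => h.2.2 c hc c (List.mem_singleton.mpr rfl) rfl⟩
  · rintro ⟨h1, h2⟩
    rw [List.nodup_append]
    refine ⟨h1, List.nodup_singleton c, ?_⟩
    rintro a ha b hb
    simp only [List.mem_singleton] at hb
    subst hb
    exact fun e => h2 (e ▸ ha)

lemma minStart_step {t : List Char} {c : Char} {st : Nat} (h : minStart t st) :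
    minStart (t ++ [c])
      (match lastOcc t c with
       | some j => if st ≤ j then j + 1 else st
       | none => st) := by
  obtain ⟨hle, hnd, hmin⟩ := h
  have hlen : (t ++ [c]).length = t.length + 1 := by simp
  have hmin' : ∀ k, k < st → ¬ ((t ++ [c]).drop k).Nodup := by
    intro k hk hndk
    rw [List.drop_append_of_le_length (by omega)] at hndk
    exact hmin k hk ((nodup_snoc _ _).mp hndk).1
  cases h' : lastOcc t c with
  | none =>
      show minStart (t ++ [c]) st
      have hnotmem : c ∉ t := (lastOcc_none_iff t c).mp h'
      refine ⟨by omega, ?_, hmin'⟩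
      rw [List.drop_append_of_le_length hle]
      exact (nodup_snoc _ _).mpr ⟨hnd, fun hc => hnotmem (List.drop_subset _ _ hc)⟩
  | some j =>
      show minStart (t ++ [c]) (if st ≤ j then j + 1 else st)
      obtain ⟨hjlt, hmemiff⟩ := lastOcc_some h'
      by_cases hstj : st ≤ j
      · rw [if_pos hstj]
        refine ⟨by omega, ?_, ?_⟩
        · rw [List.drop_append_of_le_length (by omega)]
          refine (nodup_snoc _ _).mpr ⟨nodup_drop_mono hnd (by omega), ?_⟩
          intro hc
          have := (hmemiff (j + 1)).mp hc
          omega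
        · intro k hk hndk
          by_cases hks : k < st
          · exact hmin' k hks hndk
          · rw [List.drop_append_of_le_length (by omega)] at hndk
            have hcmem : c ∈ t.drop k := (hmemiff k).mpr (by omega)
            exact ((nodup_snoc _ _).mp hndk).2 hcmem
      · rw [if_neg hstj]
        refine ⟨by omega, ?_, hmin'⟩
        rw [List.drop_append_of_le_length hle]
        refine (nodup_snoc _ _).mpr ⟨hnd, ?_⟩
        intro hc
        have := (hmemiff st).mp hc
        omega

-- ---- A-side ----

lemma awLoop_neg (s : List Char) (length : Int) (hneg : length < 0) :
    ∀ (rest : List Char) (pos : Int), awLoop s length rest pos = none := by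
  intro rest
  induction rest with
  | nil => intro pos; rfl
  | cons x rest' ih =>
      intro pos
      simp only [awLoop]
      rw [if_neg (by intro hc; omega)]
      exact ih (pos + 1)

lemma awLoop_eq (s : List Char) (n : Nat) (hn : 1 ≤ n) :
    ∀ (rest : List Char) (p : Nat), rest = s.drop p → n ≤ p →
    awLoop s (n : Int) rest (p : Int)
      = ((List.range' (p + 1) (s.length - p)).find? (fun q => decide ((windowAt s n q).Nodup))).map
          (fun q : Nat => (q : Int)) := by
  intro rest
  induction rest with
  | nil =>
      intro p hrest hnp
      have hlen : s.length ≤ p := by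
        have := List.drop_eq_nil_iff.mp hrest.symm
        omega
      rw [show s.length - p = 0 from by omega]
      simp [awLoop]
  | cons x rest' ih =>
      intro p hrest hnp
      have hplt : p < s.length := by
        by_contra hh
        rw [List.drop_eq_nil_iff.mpr (by omega)] at hrest
        exact (List.cons_ne_nil _ _) hrest
      have hrest' : rest' = s.drop (p + 1) := by
        have h2 : (x :: rest').tail = (s.drop p).tail := by rw [hrest]
        simpa [List.tail_drop] using h2
      have hcast : (p : Int) + 1 = ((p + 1 : Nat) : Int) := by push_cast; ring
      have hwin : PySem.List.slice s (some ((p : Int) + 1 - (n : Int))) (some ((p : Int) + 1))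
          = windowAt s n (p + 1) := by
        rw [hcast, show ((p + 1 : Nat) : Int) - (n : Int) = ((p + 1 - n : Nat) : Int) from by omega]
        rw [PySem.List.slice_natCast]
        unfold windowAt
        congr 1
        omega
      have hwlen : (windowAt s n (p + 1)).length = n := by
        unfold windowAt
        simp only [List.length_take, List.length_drop]
        omega
      have hcond : (((PySem.Set.ofList (windowAt s n (p + 1))).length : Int) = (n : Int))
          ↔ (windowAt s n (p + 1)).Nodup := by
        rw [Nat.cast_inj]
        constructor
        · intro h
          exact (setLen_eq_iff _).mp (h.trans hwlen.symm)
        · intro h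
          rw [(setLen_eq_iff _).mpr h, hwlen]
      rw [show s.length - p = (s.length - (p + 1)) + 1 from by omega, List.range'_succ]
      simp only [awLoop, hwin]
      by_cases hnd : (windowAt s n (p + 1)).Nodup
      · rw [if_pos (hcond.mpr hnd), List.find?_cons_of_pos (by simp [hnd])]
        simp only [Option.map_some]
        exact congrArg some hcast
      · rw [if_neg (fun hc => hnd (hcond.mp hc)), List.find?_cons_of_neg (by simp [hnd])]
        rw [hcast]
        exact ih (p + 1) hrest' (by omega)

lemma checkA_eq (s : List Char) (n : Nat) (hn : 1 ≤ n) :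
    (let window := PySem.List.slice s (some 0) (some (n : Int))
     if ((PySem.Set.ofList window).length : Int) = (n : Int) then some (n : Int)
     else awLoop s (n : Int) (PySem.List.slice s (some (n : Int)) none) (n : Int))
      = (firstOKN s n).map (fun q : Nat => (q : Int)) := by
  have hw : PySem.List.slice s (some (0 : Int)) (some (n : Int)) = s.take n := by
    rw [show ((0 : Int)) = ((0 : Nat) : Int) from rfl, PySem.List.slice_natCast]
    simp
  have hdrop : PySem.List.slice s (some (n : Int)) none = s.drop n := by
    rw [PySem.List.slice_from_natCast]
  by_cases hnl : n ≤ s.length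
  · have hwlen : (s.take n).length = n := by simp; omega
    have hwin0 : windowAt s n n = s.take n := by
      unfold windowAt
      rw [show n - n = 0 from by omega]
      simp
    have hcond : (((PySem.Set.ofList (s.take n)).length : Int) = (n : Int)) ↔ (s.take n).Nodup := by
      rw [Nat.cast_inj]
      constructor
      · intro h
        exact (setLen_eq_iff _).mp (h.trans hwlen.symm)
      · intro h
        rw [(setLen_eq_iff _).mpr h, hwlen]
    unfold firstOKN
    rw [show s.length + 1 - n = (s.length - n) + 1 from by omega, List.range'_succ]
    simp only [hw, hdrop]
    by_cases hnd : (s.take n).Nodup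
    · rw [if_pos (hcond.mpr hnd), List.find?_cons_of_pos (by simp [hwin0, hnd])]
      simp
    · rw [if_neg (fun hc => hnd (hcond.mp hc)), List.find?_cons_of_neg (by simp [hwin0, hnd])]
      exact awLoop_eq s n hn (s.drop n) n rfl le_rfl
  · have hwlen : (s.take n).length = s.length := by simp; omega
    have hcond : ¬ (((PySem.Set.ofList (s.take n)).length : Int) = (n : Int)) := by
      rw [Nat.cast_inj]
      have := PySem.Set.length_ofList_le (s.take n)
      omega
    unfold firstOKN
    rw [show s.length + 1 - n = 0 from by omega]
    simp only [hw, hdrop, if_neg hcond]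
    rw [List.drop_eq_nil_iff.mpr (by omega)]
    rfl

-- ---- B-side ----

lemma bwLoop_eq (s : List Char) (n : Nat) (hn : 1 ≤ n) :
    ∀ (rest : List Char) (i : Nat) (last : PySem.Dict Char Int) (st : Nat),
    rest = s.drop i → i ≤ s.length →
    (∀ c, last.get? c = (lastOcc (s.take i) c).map (fun j : Nat => (j : Int))) →
    minStart (s.take i) st →
    bwLoop (n : Int) (PySem.List.enumerate rest (i : Int)) last (st : Int)
      = ((List.range' (i + 1) (s.length - i)).find?
          (fun q => decide (n ≤ q ∧ (windowAt s n q).Nodup))).map (fun q : Nat => (q : Int)) := by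
  intro rest
  induction rest with
  | nil =>
      intro i last st hrest hile hd hst
      have hlen : s.length ≤ i := by
        have := List.drop_eq_nil_iff.mp hrest.symm
        omega
      rw [show s.length - i = 0 from by omega]
      rfl
  | cons x rest' ih =>
      intro i last st hrest hile hd hst
      have hplt : i < s.length := by
        by_contra hh
        rw [List.drop_eq_nil_iff.mpr (by omega)] at hrest
        exact (List.cons_ne_nil _ _) hrest
      have hti : (s.take i).length = i := by simp; omega
      have hrest' : rest' = s.drop (i + 1) := by
        have h2 : (x :: rest').tail = (s.drop i).tail := by rw [hrest]
        simpa [List.tail_drop] using h2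
      have hsx : s[i]? = some x := by
        rw [← List.head?_drop, ← hrest]
        rfl
      have htsucc : s.take (i + 1) = s.take i ++ [x] := by
        rw [List.take_add_one, hsx]
        rfl
      -- the updated start, at the Nat level
      set stN' : Nat := (match lastOcc (s.take i) x with
        | some j => if st ≤ j then j + 1 else st
        | none => st) with hstN'
      have hst' : minStart (s.take (i + 1)) stN' := by
        rw [htsucc]
        exact minStart_step hst
      have hstN'le : stN' ≤ i + 1 := by
        have := hst'.1
        simp [htsucc] at this
        omega
      -- the Int-level updated start equals the Nat-level one
      have hstart : (match PySem.Dict.get? last x with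
          | some j => if (st : Int) ≤ j then j + 1 else (st : Int)
          | none => (st : Int)) = ((stN' : Nat) : Int) := by
        rw [hd x, hstN']
        cases lastOcc (s.take i) x with
        | none => rfl
        | some j =>
            simp only [Option.map_some]
            by_cases hsj : st ≤ j
            · rw [if_pos (by exact_mod_cast hsj), if_pos hsj]
              push_cast
              ring
            · rw [if_neg (by exact_mod_cast hsj), if_neg hsj]
      -- the loop test at this step is exactly the window predicate at position i+1
      have hwin : windowAt s n (i + 1) = (s.take (i + 1)).drop (i + 1 - n) ∨ n > i + 1 := by
        by_cases hni : n ≤ i + 1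
        · left
          unfold windowAt
          rw [List.drop_take, show (i + 1) - (i + 1 - n) = n from by omega]
        · right; omega
      have hcond : ((n : Int) ≤ (i : Int) - (stN' : Int) + 1)
          ↔ (n ≤ i + 1 ∧ (windowAt s n (i + 1)).Nodup) := by
        rw [show (i : Int) - (stN' : Int) + 1 = ((i + 1 - stN' : Nat) : Int) from by omega,
            Nat.cast_le]
        constructor
        · intro hc
          have hni : n ≤ i + 1 := by omega
          refine ⟨hni, ?_⟩
          rcases hwin with hwe | hgt
          · rw [hwe]
            exact nodup_drop_mono hst'.2.1 (by omega)
          · omega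
        · rintro ⟨hni, hnd⟩
          rcases hwin with hwe | hgt
          · rw [hwe] at hnd
            by_contra hc
            exact hst'.2.2 (i + 1 - n) (by omega) hnd
          · omega
      rw [show s.length - i = (s.length - (i + 1)) + 1 from by omega, List.range'_succ]
      rw [PySem.List.enumerate_cons]
      simp only [bwLoop, hstart]
      by_cases hc : (n : Int) ≤ (i : Int) - (stN' : Int) + 1
      · rw [if_pos hc, List.find?_cons_of_pos (by simp [hcond.mp hc])]
        simp only [Option.map_some]
        exact congrArg some (by push_cast; ring)
      · rw [if_neg hc, List.find?_cons_of_neg (by simp; intro h1 h2; exact hc (hcond.mpr ⟨h1, h2⟩))]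
        rw [show (i : Int) + 1 = ((i + 1 : Nat) : Int) from by push_cast; ring]
        refine ih (i + 1) _ stN' hrest' (by omega) ?_ hst'
        intro c
        rw [htsucc, lastOcc_snoc]
        by_cases hxc : x = c
        · subst hxc
          rw [PySem.Dict.get?_insert_self, if_pos rfl, hti]
          rfl
        · rw [PySem.Dict.get?_insert_of_ne _ _ (Ne.symm hxc), if_neg hxc]
          exact hd c

lemma checkB_eq (s : List Char) (n : Nat) (hn : 1 ≤ n) :
    bwLoop (n : Int) (PySem.List.enumerate s 0) PySem.Dict.empty 0
      = (firstOKN s n).map (fun q : Nat => (q : Int)) := by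
  have h0 := bwLoop_eq s n hn s 0 PySem.Dict.empty 0 (by simp) (Nat.zero_le _)
    (fun c => by rw [PySem.Dict.get?_empty]; rfl)
    ⟨Nat.zero_le _, by simp, fun k hk => absurd hk (Nat.not_lt_zero k)⟩
  rw [show ((0 : Nat) : Int) = (0 : Int) from rfl] at h0
  rw [h0, show s.length - 0 = s.length from rfl, Nat.zero_add]
  unfold firstOKN
  by_cases hnl : n ≤ s.length
  · have hsplit : List.range' 1 s.length = List.range' 1 (n - 1) ++ List.range' n (s.length + 1 - n) := by
      rw [show List.range' n (s.length + 1 - n) = List.range' (1 + 1 * (n - 1)) (s.length + 1 - n) from by congr 1; omega,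
          List.range'_append, show (n - 1) + (s.length + 1 - n) = s.length from by omega]
    rw [hsplit, List.find?_append]
    rw [List.find?_eq_none.mpr (fun q hq => by
      have := List.mem_range'_1.mp hq
      simp only [decide_eq_true_eq, not_and]
      intro hnq
      omega)]
    rw [Option.none_or]
    congr 1
    apply find?_congr_mem
    intro q hq
    have := List.mem_range'_1.mp hq
    simp [show n ≤ q from this.1]
  · rw [show s.length + 1 - n = 0 from by omega]
    rw [List.find?_eq_none.mpr (fun q hq => by
      have := List.mem_range'_1.mp hq
      simp only [decide_eq_true_eq, not_and]
      intro hnq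
      omega)]
    rfl

-- ===== VERDICT (by name: the statement is the Claim_ definition above) =====
theorem check_window_spec : Claim_equal_check_window := by
  intro input_lines length _dom
  unfold Spec_check_window check_window check_window_alt
  by_cases hneg : length < 0
  · rw [if_pos hneg, if_neg (by intro hc; omega)]
    exact awLoop_neg _ _ hneg _ _
  · obtain ⟨n, rfl⟩ : ∃ n : Nat, length = (n : Int) :=
      ⟨length.toNat, (Int.toNat_of_nonneg (not_lt.mp hneg)).symm⟩
    rw [if_neg hneg]
    by_cases hz : (n : Int) = 0
    · have hn0 : n = 0 := by exact_mod_cast hz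
      subst hn0
      rw [if_pos hz]
      have hw : PySem.List.slice input_lines.toList (some (0 : Int)) (some (((0 : Nat)) : Int)) = [] := by
        rw [show (0 : Int) = ((0 : Nat) : Int) from rfl, PySem.List.slice_natCast]
        simp
      rw [if_pos (by rw [hw]; simp)]
      exact congrArg some hz
    · rw [if_neg hz]
      have hn : 1 ≤ n := by
        by_contra hh
        exact hz (by omega)
      exact (checkA_eq input_lines.toList n hn).trans (checkB_eq input_lines.toList n hn).symm
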